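-- pv_equiv track=rewrite | github.com/Le-Gall-Valentin/Tetris_project | MutablesGridsMatrix.py | createDiamondGridMatrix
-- ===== SOURCE A (Python) =====
-- def createDiamondGridMatrix(long: int) -> list:
--     """
--     Crée une grille en forme de losange de taille (long)
--     :param long: entier, C'est la taille en longueur et largeur de la grille
--     :return: liste, Renvoie une liste 2D représentant la grille diamant
--     """
--     gridMatrix = list()
--     pas = 0
--     for i in range(long):
--         gridMatrix.append([1]*long)
--         for j in range(0, long//2 - pas, 1):
--             gridMatrix[i][-j-1] = 0
--             gridMatrix[i][j] = 0
--         if i < (long//2):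
--             pas += 1
--         else:
--             pas -= 1
--     return gridMatrix
-- ===== SOURCE B (Python) =====
-- def createDiamondGridMatrix(long: int) -> list:
--     """Diamond 0/1 grid: row i has z = abs(i - long//2) zeros on each side,
--     built directly by list repetition instead of a running accumulator with
--     in-place two-sided assignments."""
--     grid = []
--     for i in range(long):
--         z = abs(i - long // 2)
--         grid.append([0] * z + [1] * (long - 2 * z) + [0] * z)
--     return grid
-- ===== Notes on version B (the rewrite author's own statement) =====
-- stated objective: simpler
-- what changed: Replaces the running 'pas' accumulator with its up/down branch and the per-cell in-place two-sided assignments (including negative indexing) by a closed-form per-row zero count z = abs(i - long//2) and direct row construction [0]*z + [1]*(long-2*z) + [0]*z.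
import Mathlib
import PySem

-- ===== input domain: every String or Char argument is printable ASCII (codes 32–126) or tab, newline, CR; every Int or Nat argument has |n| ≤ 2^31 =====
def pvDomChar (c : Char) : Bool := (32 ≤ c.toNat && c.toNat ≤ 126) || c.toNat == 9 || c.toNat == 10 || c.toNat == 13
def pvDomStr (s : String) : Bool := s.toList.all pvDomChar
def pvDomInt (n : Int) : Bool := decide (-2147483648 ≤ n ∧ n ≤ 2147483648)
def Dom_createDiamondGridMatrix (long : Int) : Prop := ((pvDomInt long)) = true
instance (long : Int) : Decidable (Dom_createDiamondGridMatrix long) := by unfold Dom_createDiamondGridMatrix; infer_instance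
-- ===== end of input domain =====

-- B replaces A's running `pas` accumulator and in-place two-sided assignments by a
-- closed-form per-row zero count z = |i - long//2| and direct row construction by
-- list repetition [0]*z + [1]*(long-2z) + [0]*z (objective: simpler).

-- ===== PORT A =====
-- A appends the row first and then mutates gridMatrix[i] (= the last row) in place;
-- ported as pure pyGetD/pySetD steps on the grid, Python-exact including the negative index -j-1.
def createDiamondGridMatrix (long : Int) : List (List Int) :=
  ((PySem.List.pyRange 0 long 1).foldl
    (fun (st : List (List Int) × Int) i =>
      let g0 := st.1 ++ [List.replicate long.toNat 1]
      let g1 := (PySem.List.pyRange 0 (PySem.Int.floordiv long 2 - st.2) 1).foldl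
        (fun g j =>
          let g' := PySem.List.pySetD g i
            (PySem.List.pySetD (PySem.List.pyGetD g i []) (-j - 1) 0)
          PySem.List.pySetD g' i
            (PySem.List.pySetD (PySem.List.pyGetD g' i []) j 0))
        g0
      (g1, if i < PySem.Int.floordiv long 2 then st.2 + 1 else st.2 - 1))
    ([], 0)).1

-- ===== PORT B =====
def createDiamondGridMatrix_alt (long : Int) : List (List Int) :=
  (PySem.List.pyRange 0 long 1).map (fun i =>
    let z := |i - PySem.Int.floordiv long 2|
    List.replicate z.toNat 0 ++ List.replicate (long - 2 * z).toNat 1 ++ List.replicate z.toNat 0)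

-- ===== PRECONDITION & SPEC =====
def Spec_createDiamondGridMatrix (long : Int) (out : List (List Int)) : Prop := out = createDiamondGridMatrix_alt long
instance (long : Int) (out : List (List Int)) : Decidable (Spec_createDiamondGridMatrix long out) := by unfold Spec_createDiamondGridMatrix; infer_instance

-- ===== CLAIM (what is proved, stated in full; the proofs are below) =====
def Claim_equal_createDiamondGridMatrix : Prop := ∀ (long : Int), Dom_createDiamondGridMatrix long → Spec_createDiamondGridMatrix long (createDiamondGridMatrix long)

-- ===== LEMMAS AND PROOFS =====

-- A's outer-loop body, named so the invariant lemma can speak about it.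
def stepA (long : Int) (st : List (List Int) × Int) (i : Int) : List (List Int) × Int :=
  let g0 := st.1 ++ [List.replicate long.toNat 1]
  let g1 := (PySem.List.pyRange 0 (PySem.Int.floordiv long 2 - st.2) 1).foldl
    (fun g j =>
      let g' := PySem.List.pySetD g i
        (PySem.List.pySetD (PySem.List.pyGetD g i []) (-j - 1) 0)
      PySem.List.pySetD g' i
        (PySem.List.pySetD (PySem.List.pyGetD g' i []) j 0))
    g0
  (g1, if i < PySem.Int.floordiv long 2 then st.2 + 1 else st.2 - 1)

-- B's row i, named for the invariant.
def rowB (long : Int) (i : Int) : List Int :=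
  List.replicate (|i - PySem.Int.floordiv long 2|).toNat 0
    ++ List.replicate (long - 2 * |i - PySem.Int.floordiv long 2|).toNat 1
    ++ List.replicate (|i - PySem.Int.floordiv long 2|).toNat 0

lemma unfoldA (long : Int) :
    createDiamondGridMatrix long = ((PySem.List.pyRange 0 long 1).foldl (stepA long) ([], 0)).1 := rfl

lemma unfoldB (long : Int) :
    createDiamondGridMatrix_alt long = (PySem.List.pyRange 0 long 1).map (rowB long) := rfl

-- Python's xs[-j-1] = v for 0 ≤ j < len(xs) is an in-range write at position len-1-j.
lemma pySetD_negIdx (xs : List Int) (j : Int) (h0 : 0 ≤ j) (h : j < xs.length) (v : Int) :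
    PySem.List.pySetD xs (-j - 1) v = xs.set (xs.length - 1 - j.toNat) v := by
  simp only [PySem.List.pySetD, PySem.List.pySet?, PySem.List.pyIdx?]
  split_ifs with h1 h2 <;> simp_all <;> try omega
  congr 1; omega

lemma pyGetD_appendLast (xs : List (List Int)) (r : List Int) (i : Int)
    (h : i = (xs.length : Int)) : PySem.List.pyGetD (xs ++ [r]) i [] = r := by
  subst h
  rw [PySem.List.pyGetD_natCast]
  simp

lemma pySetD_appendLast (xs : List (List Int)) (r r' : List Int) (i : Int)
    (h : i = (xs.length : Int)) : PySem.List.pySetD (xs ++ [r]) i r' = xs ++ [r'] := by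
  subst h
  rw [PySem.List.pySetD_natCast]
  simp

-- A's inner loop only touches index i = the freshly appended last row.
lemma inner_append (i : Int) (js : List Int) (xs : List (List Int)) (r : List Int)
    (h : i = (xs.length : Int)) :
    js.foldl
      (fun g j =>
        let g' := PySem.List.pySetD g i
          (PySem.List.pySetD (PySem.List.pyGetD g i []) (-j - 1) 0)
        PySem.List.pySetD g' i
          (PySem.List.pySetD (PySem.List.pyGetD g' i []) j 0)) (xs ++ [r])
    = xs ++ [js.foldl (fun r j => PySem.List.pySetD (PySem.List.pySetD r (-j - 1) 0) j 0) r] := by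
  induction js generalizing r with
  | nil => rfl
  | cons j js ih =>
      simp only [List.foldl_cons]
      rw [pyGetD_appendLast _ _ _ h, pySetD_appendLast _ _ _ _ h,
          pyGetD_appendLast _ _ _ h, pySetD_appendLast _ _ _ _ h, ih]

-- Writing z zeros at both ends of a row of n ones equals 0^z ++ 1^(n-2z) ++ 0^z.
lemma row_lemma (n z : Nat) (hz : 2 * z ≤ n) :
    (PySem.List.pyRange 0 (z : Int) 1).foldl
      (fun r j => PySem.List.pySetD (PySem.List.pySetD r (-j - 1) 0) j 0)
      (List.replicate n (1 : Int))
    = List.replicate z 0 ++ List.replicate (n - 2 * z) 1 ++ List.replicate z 0 := by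
  induction z with
  | zero =>
      rw [PySem.List.pyRange_one_eq_nil (by norm_num), List.foldl_nil]
      simp
  | succ z ih =>
      have hc : ((z + 1 : Nat) : Int) = (z : Int) + 1 := by push_cast; ring
      rw [hc, PySem.List.pyRange_one_succ_right (by positivity), List.foldl_append,
          ih (by omega)]
      simp only [List.foldl_cons, List.foldl_nil]
      have hlen : (List.replicate z (0:Int) ++ List.replicate (n - 2 * z) 1
          ++ List.replicate z 0).length = n := by
        simp; omega
      rw [pySetD_negIdx _ _ (by positivity) (by rw [hlen]; exact_mod_cast by omega),
          PySem.List.pySetD_natCast]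
      apply List.ext_getElem
      · simp; omega
      · intro k h1 h2
        simp only [List.length_set, hlen] at h1
        simp only [List.getElem_set, hlen, Int.toNat_natCast]
        simp only [List.getElem_append, List.length_replicate, List.getElem_replicate,
          List.length_append]
        split_ifs <;> first | rfl | omega

-- Invariant: after t outer iterations A's state is (B's first t rows, pas t),
-- with pas t = t on the way up and 2*(long//2) - t on the way down.
lemma outer (long : Int) (hl : 0 ≤ long) (t : Nat) (ht : (t : Int) ≤ long) :
    (PySem.List.pyRange 0 (t : Int) 1).foldl (stepA long) ([], 0)
    = ((PySem.List.pyRange 0 (t : Int) 1).map (rowB long),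
       if (t : Int) ≤ PySem.Int.floordiv long 2 then (t : Int)
       else 2 * PySem.Int.floordiv long 2 - t) := by
  have hm : PySem.Int.floordiv long 2 = long / 2 :=
    PySem.Int.floordiv_eq_ediv_of_pos (by norm_num)
  induction t with
  | zero =>
      rw [PySem.List.pyRange_one_eq_nil (by norm_num)]
      simp only [List.foldl_nil, List.map_nil]
      rw [if_pos (by rw [hm]; omega)]
      norm_num
  | succ t ih =>
      have hc : ((t + 1 : Nat) : Int) = (t : Int) + 1 := by push_cast; ring
      have ht' : (t : Int) ≤ long := by omega
      rw [hc, PySem.List.pyRange_one_succ_right (by positivity), List.foldl_append,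
          List.map_append, ih ht']
      simp only [List.foldl_cons, List.foldl_nil, List.map_cons, List.map_nil]
      set m := PySem.Int.floordiv long 2 with hmdef
      set pas : Int := if (t : Int) ≤ m then (t : Int) else 2 * m - t with hpas
      set grid := (PySem.List.pyRange 0 (t : Int) 1).map (rowB long) with hgrid
      have hglen : (grid.length : Int) = (t : Int) := by
        simp [hgrid, PySem.List.length_pyRange_one]
      set zI : Int := m - pas with hzI
      have habs : zI = |(t : Int) - m| := by
        rw [Int.abs_eq_natAbs, hzI, hpas]
        split_ifs <;> omega
      have hz0 : 0 ≤ zI := by rw [habs]; positivity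
      have hzb : 2 * zI ≤ long := by
        rw [habs, Int.abs_eq_natAbs]
        rw [hm] at hmdef
        omega
      show (stepA long (grid, pas) (t : Int)) = (grid ++ [rowB long (t : Int)], _)
      unfold stepA
      simp only [hmdef.symm]
      rw [inner_append _ _ _ _ hglen.symm]
      have hrow : (PySem.List.pyRange 0 (m - pas) 1).foldl
          (fun r j => PySem.List.pySetD (PySem.List.pySetD r (-j - 1) 0) j 0)
          (List.replicate long.toNat 1) = rowB long (t : Int) := by
        have hcast : m - pas = ((zI.toNat : Nat) : Int) := by
          rw [Int.toNat_of_nonneg hz0]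
        rw [hcast, row_lemma long.toNat zI.toNat (by omega)]
        unfold rowB
        rw [← habs]
        have hn : long.toNat - 2 * zI.toNat = (long - 2 * zI).toNat := by omega
        rw [hn]
      rw [hrow]
      congr 1
      · show (if (t : Int) < m then pas + 1 else pas - 1) = _
        rw [hpas, hm]
        split_ifs <;> omega

-- ===== VERDICT (by name: the statement is the Claim_ definition above) =====
theorem createDiamondGridMatrix_spec : Claim_equal_createDiamondGridMatrix := by
  intro long _
  unfold Spec_createDiamondGridMatrix
  by_cases h : long ≤ 0
  · rw [unfoldA, unfoldB, PySem.List.pyRange_one_eq_nil h]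
    rfl
  · rw [unfoldA, unfoldB]
    rw [show PySem.List.pyRange 0 long 1
          = PySem.List.pyRange 0 ((long.toNat : Nat) : Int) 1 by rw [Int.toNat_of_nonneg (by omega)]]
    rw [outer long (by omega) long.toNat (by omega)]
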